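-- pv_equiv track=rewrite | github.com/zaldeg/codewars | scramble.py | scramble
-- ===== SOURCE A (Python) =====
-- def make_dict(a):
--     d = {}
--     for i in a:
--         if i not in d:
--             d[i] = 1
--         else:
--             d[i] += 1
--     return d
--
-- def scramble(s1, s2):
--     s1 = make_dict(s1)
--     s2 = make_dict(s2)
--     for a in s2:
--         try:
--             if s1[a] < s2[a]:
--                 return False
--         except KeyError:
--             return False
--     return True
-- ===== SOURCE B (Python) =====
-- def scramble(s1, s2):
--     # One "remaining demand" table built from s2, consumed by a single pass over s1.
--     need = {}
--     for c in s2: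
--         need[c] = need.get(c, 0) + 1
--     for c in s1:
--         if need.get(c, 0) > 0:
--             need[c] = need[c] - 1
--     return all(v <= 0 for v in need.values())
-- ===== Notes on version B (the rewrite author's own statement) =====
-- stated objective: alternative
-- what changed: Instead of building two frequency dicts and comparing them key by key with try/except, B builds one 'remaining demand' dict from s2 and consumes it in a single pass over s1, then checks all remaining demands are zero.
import Mathlib
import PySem

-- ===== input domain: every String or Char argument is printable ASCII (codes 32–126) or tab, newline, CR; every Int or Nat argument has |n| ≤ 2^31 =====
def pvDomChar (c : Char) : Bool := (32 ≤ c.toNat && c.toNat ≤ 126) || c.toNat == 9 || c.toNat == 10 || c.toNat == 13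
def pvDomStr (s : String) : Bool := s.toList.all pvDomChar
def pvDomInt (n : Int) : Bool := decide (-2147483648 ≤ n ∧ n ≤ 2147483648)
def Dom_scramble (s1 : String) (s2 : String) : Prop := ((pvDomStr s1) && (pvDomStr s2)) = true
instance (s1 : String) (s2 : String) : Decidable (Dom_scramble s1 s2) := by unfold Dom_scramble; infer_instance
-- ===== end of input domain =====

-- B replaces A's two frequency dicts compared under try/except by one 'remaining demand'
-- dict from s2 consumed by a single pass over s1 (alternative decomposition, same cost).

-- ===== PORT A =====
-- make_dict: count occurrences, branch order as in the Python
def makeDict (a : List Char) : PySem.Dict Char Int :=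
  a.foldl (fun d i => if d.contains i = false then d.insert i 1 else d.modify i 0 (· + 1))
    PySem.Dict.empty

-- the 'for a in s2: try … except KeyError: return False' loop (early return as recursion)
def scrambleLoop (d1 d2 : PySem.Dict Char Int) : List Char → Bool
  | [] => true
  | a :: rest =>
    match d1.get? a with
    | none => false                      -- KeyError branch
    | some v => if v < d2.getD a 0 then false else scrambleLoop d1 d2 rest

def scramble (s1 : String) (s2 : String) : Bool :=
  let d1 := makeDict s1.toList
  let d2 := makeDict s2.toList
  scrambleLoop d1 d2 d2.keys

-- ===== PORT B =====
def scramble_alt (s1 : String) (s2 : String) : Bool :=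
  let need0 : PySem.Dict Char Int := s2.toList.foldl (fun d c => d.insert c (d.getD c 0 + 1)) PySem.Dict.empty
  let need := s1.toList.foldl
    (fun d c => if d.getD c 0 > 0 then d.insert c (d.getD c 0 - 1) else d) need0
  need.values.all (fun v => v ≤ 0)

-- ===== PRECONDITION & SPEC =====
def Spec_scramble (s1 : String) (s2 : String) (out : Bool) : Prop := out = scramble_alt s1 s2
instance (s1 : String) (s2 : String) (out : Bool) : Decidable (Spec_scramble s1 s2 out) := by unfold Spec_scramble; infer_instance

-- ===== CLAIM (what is proved, stated in full; the proofs are below) =====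
def Claim_equal_scramble : Prop := ∀ (s1 : String) (s2 : String), Dom_scramble s1 s2 → Spec_scramble s1 s2 (scramble s1 s2)

-- ===== LEMMAS AND PROOFS =====

theorem makeDict_eq_counter (a : List Char) : makeDict a = PySem.Dict.counter a := by
  unfold makeDict
  rw [PySem.Dict.counter_eq_foldl]
  have hf : (fun (d : PySem.Dict Char Int) i =>
      if d.contains i = false then d.insert i 1 else d.modify i 0 (· + 1))
      = (fun (d : PySem.Dict Char Int) i => d.modify i 0 (· + 1)) := by
    funext d i
    by_cases h : d.contains i = true
    · simp [h]
    · have h' : d.contains i = false := by simpa using h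
      simp [h', PySem.Dict.insert, PySem.Dict.modify,
        PySem.Dict.getD_of_not_contains d (0 : Int) h']
  rw [hf]

theorem scrambleLoop_eq_all (d1 d2 : PySem.Dict Char Int) (l : List Char) :
    scrambleLoop d1 d2 l
      = l.all (fun a =>
          match d1.get? a with
          | none => false
          | some v => decide ¬ (v < d2.getD a 0)) := by
  induction l with
  | nil => rfl
  | cons a rest ih =>
    simp only [scrambleLoop, List.all_cons]
    cases h : d1.get? a with
    | none => simp
    | some v =>
      by_cases hv : v < d2.getD a 0
      · simp [hv]
      · simp [hv, ih]

theorem all_congr_mem {α : Type} (l : List α) (f g : α → Bool)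
    (h : ∀ x ∈ l, f x = g x) : l.all f = l.all g := by
  induction l with
  | nil => rfl
  | cons a rest ih =>
    simp only [List.all_cons]
    rw [h a (by simp), ih (fun x hx => h x (by simp [hx]))]

-- the consuming pass never changes the key list (it only overwrites existing keys)
theorem consume_keys (l : List Char) (d : PySem.Dict Char Int) :
    (l.foldl (fun d c => if d.getD c 0 > 0 then d.insert c (d.getD c 0 - 1) else d) d).keys
      = d.keys := by
  induction l generalizing d with
  | nil => rfl
  | cons c rest ih =>
    simp only [List.foldl_cons]
    by_cases h : d.getD c 0 > 0
    · have hc : d.contains c = true := by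
        by_contra hc
        have hc' : d.contains c = false := by simpa using hc
        rw [PySem.Dict.getD_of_not_contains d (0 : Int) hc'] at h
        omega
      rw [if_pos h, ih, PySem.Dict.keys_insert_of_contains d _ hc]
    · rw [if_neg h, ih]

-- per-key value after the consuming pass: remaining demand = max (initial - supplied) 0
theorem consume_getD (l : List Char) (d : PySem.Dict Char Int) (c : Char)
    (h : 0 ≤ d.getD c 0) :
    (l.foldl (fun d c => if d.getD c 0 > 0 then d.insert c (d.getD c 0 - 1) else d) d).getD c 0
      = max (d.getD c 0 - l.count c) 0 := by
  induction l generalizing d with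
  | nil => simp; omega
  | cons x rest ih =>
    simp only [List.foldl_cons]
    by_cases hx : x = c
    · subst hx
      by_cases hv : d.getD x 0 > 0
      · rw [if_pos hv, ih _ (by rw [PySem.Dict.getD_insert_self]; omega)]
        rw [PySem.Dict.getD_insert_self, List.count_cons_self]
        omega
      · have h0 : d.getD x 0 = 0 := by omega
        rw [if_neg hv, ih _ h, h0, List.count_cons_self]
        omega
    · have hx' : c ≠ x := fun hc => hx hc.symm
      have hcount : (x :: rest).count c = rest.count c := by
        simp [hx]
      by_cases hv : d.getD x 0 > 0
      · rw [if_pos hv, ih _ (by rw [PySem.Dict.getD_insert_of_ne d _ _ hx']; exact h)]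
        rw [PySem.Dict.getD_insert_of_ne d _ _ hx', hcount]
      · rw [if_neg hv, ih _ h, hcount]

theorem scramble_eq_alt (s1 s2 : String) : scramble s1 s2 = scramble_alt s1 s2 := by
  unfold scramble scramble_alt
  simp only [PySem.Dict.foldl_insert_getD_add_one_eq_counter, makeDict_eq_counter,
    scrambleLoop_eq_all]
  rw [PySem.Dict.values_eq_map_keys _ (by rw [consume_keys]; exact PySem.Dict.nodup_keys_counter _) 0]
  rw [List.all_map, consume_keys]
  apply all_congr_mem
  intro a ha
  have ha2 : a ∈ s2.toList := by
    rw [PySem.Dict.keys_counter] at ha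
    exact (PySem.Set.mem_ofList _ _).mp ha
  have hc2 : 0 < s2.toList.count a := List.count_pos_iff.mpr ha2
  simp only [Function.comp_apply]
  rw [consume_getD _ _ _ (by rw [PySem.Dict.getD_counter]; positivity)]
  simp only [PySem.Dict.getD_counter]
  cases hg : (PySem.Dict.counter s1.toList).get? a with
  | none =>
    have hnc : (PySem.Dict.counter s1.toList).contains a = false := by
      rw [PySem.Dict.contains_eq_isSome_get?, hg]; rfl
    rw [PySem.Dict.contains_counter] at hnc
    have h1 : s1.toList.count a = 0 := by
      rw [List.count_eq_zero]
      intro hmem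
      simp at hnc
      exact hnc hmem
    simp only [h1]
    simp
    omega
  | some v =>
    have hv : v = s1.toList.count a := by
      have := PySem.Dict.getD_eq_get?_getD (PySem.Dict.counter s1.toList) a 0
      rw [hg, PySem.Dict.getD_counter] at this
      simpa using this.symm
    subst hv
    by_cases hlt : (s1.toList.count a : Int) < (s2.toList.count a : Int)
    · simp [hlt]; omega
    · simp [hlt]; omega

-- ===== VERDICT (by name: the statement is the Claim_ definition above) =====
theorem scramble_spec : Claim_equal_scramble := by
  intro s1 s2 _
  unfold Spec_scramble
  exact scramble_eq_alt s1 s2
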